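-- pv_equiv track=rewrite | github.com/zmasarw3h/munero_hybrid_dashboard | munero-platform/backend/app/sql_rewrite.py | _match_postgres_dollar_quote_delimiter
-- ===== SOURCE A (Python) =====
-- def _match_postgres_dollar_quote_delimiter(text: str, start: int) -> str | None:
--     if start >= len(text) or text[start] != "$":
--         return None
--
--     end = text.find("$", start + 1)
--     if end == -1:
--         return None
--
--     tag = text[start + 1 : end]
--     if any((not (ch.isalnum() or ch == "_")) for ch in tag):
--         return None
--
--     return text[start : end + 1]
-- ===== SOURCE B (Python) =====
-- def _match_postgres_dollar_quote_delimiter(text: str, start: int) -> str | None: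
--     if start < 0 or start >= len(text) or text[start] != "$":
--         return None
--     for i in range(start + 1, len(text)):
--         ch = text[i]
--         if ch == "$":
--             return text[start : i + 1]
--         if not (ch.isalnum() or ch == "_"):
--             return None
--     return None
-- ===== Notes on version B (the rewrite author's own statement) =====
-- stated objective: simpler
-- what changed: Replaces A's find-then-validate pair (a find() scan for the closing '$', then a second any() pass re-validating the extracted tag) with a single left-to-right index scan from start+1 that returns the slice at the first '$' and rejects at the first invalid character.
-- outside the precondition, e.g. on _match_postgres_dollar_quote_delimiter('x$a$', -3): A returns '$a$', B returns None; on _match_postgres_dollar_quote_delimiter('$$x$', -1): A returns '', B returns None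
import Mathlib
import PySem

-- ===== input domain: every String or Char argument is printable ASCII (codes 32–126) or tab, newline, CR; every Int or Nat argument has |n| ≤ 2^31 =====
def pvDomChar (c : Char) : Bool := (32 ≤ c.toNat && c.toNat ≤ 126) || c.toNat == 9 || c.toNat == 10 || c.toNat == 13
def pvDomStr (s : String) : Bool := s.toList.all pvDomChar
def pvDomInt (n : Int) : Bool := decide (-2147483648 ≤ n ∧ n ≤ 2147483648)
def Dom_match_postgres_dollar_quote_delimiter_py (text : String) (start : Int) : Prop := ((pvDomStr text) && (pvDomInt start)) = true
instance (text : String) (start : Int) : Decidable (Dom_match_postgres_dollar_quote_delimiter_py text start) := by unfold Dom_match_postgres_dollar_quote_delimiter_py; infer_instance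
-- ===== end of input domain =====

-- B replaces A's find-then-validate pair with one left-to-right scan from start+1 (simpler, single pass);
-- return-value equivalence is proved for 0 ≤ start (see Pre_ below).

-- ===== PORT A =====
def match_postgres_dollar_quote_delimiter_py (text : String) (start : Int) : Option String :=
  let cs := text.toList
  if start ≥ (cs.length : Int) ∨ PySem.List.pyGet? cs start ≠ some '$' then none
  else
    let e := PySem.Chars.findFrom cs ['$'] (start + 1) none
    if e = -1 then none
    else
      let tag := PySem.List.slice cs (some (start + 1)) (some e)
      if tag.any (fun ch => !(PySem.Chars.isalnum ch || ch == '_')) then none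
      else some (String.ofList (PySem.List.slice cs (some start) (some (e + 1))))

-- ===== PORT B =====
-- the loop 'for i in range(start+1, len(text))' of Source B as structural recursion on i
def pvScanB (cs : List Char) (start : Nat) : Nat → Option String
  | i =>
    if h : i < cs.length then
      let ch := cs[i]
      if ch = '$' then some (String.ofList (PySem.List.slice cs (some (start : Int)) (some ((i : Int) + 1))))
      else if PySem.Chars.isalnum ch || ch == '_' then pvScanB cs start (i + 1)
      else none
    else none
  termination_by i => cs.length - i

def match_postgres_dollar_quote_delimiter_py_alt (text : String) (start : Int) : Option String :=
  let cs := text.toList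
  if start < 0 ∨ start ≥ (cs.length : Int) ∨ PySem.List.pyGet? cs start ≠ some '$' then none
  else pvScanB cs start.toNat (start.toNat + 1)

-- ===== PRECONDITION & SPEC =====
-- Pre_ excludes negative start positions that land on a '$' via Python's negative-index wraparound
-- (or lie below -len(text), where A raises IndexError): there A scans on from the wrapped position
-- (find's clamping, mixed-sign slices) and returns accidental slices, a corner B's explicit index
-- scan does not reproduce (B returns None for any negative start).
def Pre_match_postgres_dollar_quote_delimiter_py (text : String) (start : Int) : Prop :=
  0 ≤ start ∨ (-(text.toList.length : Int) ≤ start ∧ PySem.List.pyGet? text.toList start ≠ some '$')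
instance (text : String) (start : Int) : Decidable (Pre_match_postgres_dollar_quote_delimiter_py text start) := by unfold Pre_match_postgres_dollar_quote_delimiter_py; infer_instance
def pvWitness_match_postgres_dollar_quote_delimiter_py : String × Int := ("$tag$", 0)

def Spec_match_postgres_dollar_quote_delimiter_py (text : String) (start : Int) (out : Option String) : Prop := out = match_postgres_dollar_quote_delimiter_py_alt text start
instance (text : String) (start : Int) (out : Option String) : Decidable (Spec_match_postgres_dollar_quote_delimiter_py text start out) := by unfold Spec_match_postgres_dollar_quote_delimiter_py; infer_instance

-- ===== CLAIM (what is proved, stated in full; the proofs are below) =====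
def Claim_equal_match_postgres_dollar_quote_delimiter_py : Prop := ∀ (text : String) (start : Int), Dom_match_postgres_dollar_quote_delimiter_py text start → Pre_match_postgres_dollar_quote_delimiter_py text start → Spec_match_postgres_dollar_quote_delimiter_py text start (match_postgres_dollar_quote_delimiter_py text start)

-- ===== LEMMAS AND PROOFS =====

-- B's scan returns none when no '$' occurs at or after position i
theorem pvScanB_no_dollar (cs : List Char) (s : Nat) :
    ∀ k i, cs.length - i ≤ k → (∀ j, i ≤ j → (hj : j < cs.length) → cs[j] ≠ '$') →
    pvScanB cs s i = none := by
  intro k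
  induction k with
  | zero =>
    intro i hk h
    rw [pvScanB]
    have : ¬ i < cs.length := by omega
    simp [this]
  | succ k ih =>
    intro i hk h
    rw [pvScanB]
    by_cases hi : i < cs.length
    · have hne : cs[i] ≠ '$' := h i le_rfl hi
      simp only [hi, dite_true, hne, if_false]
      by_cases hg : (PySem.Chars.isalnum cs[i] || cs[i] == '_') = true
      · simp only [hg, if_true]
        exact ih (i + 1) (by omega) (fun j hj hjl => h j (by omega) hjl)
      · simp [hg]
    · simp [hi]

-- B's scan up to the first '$' at position e equals validate-then-slice
theorem pvScanB_to_dollar (cs : List Char) (s : Nat) (e : Nat) (he : e < cs.length)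
    (hd : cs[e] = '$') :
    ∀ k i, e - i ≤ k → i ≤ e →
    (∀ j, i ≤ j → j < e → (hj : j < cs.length) → cs[j] ≠ '$') →
    pvScanB cs s i =
      (if ((cs.drop i).take (e - i)).any (fun ch => !(PySem.Chars.isalnum ch || ch == '_')) then none
       else some (String.ofList (PySem.List.slice cs (some (s : Int)) (some ((e : Int) + 1))))) := by
  intro k
  induction k with
  | zero =>
    intro i hk hie hmin
    have hieq : i = e := by omega
    subst hieq
    rw [pvScanB]
    simp [he, hd]
  | succ k ih =>
    intro i hk hie hmin
    rcases Nat.eq_or_lt_of_le hie with hieq | hlt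
    · subst hieq
      rw [pvScanB]
      simp [he, hd]
    · have hi : i < cs.length := by omega
      rw [pvScanB]
      have hne : cs[i] ≠ '$' := hmin i le_rfl hlt hi
      have hdrop : cs.drop i = cs[i] :: cs.drop (i + 1) := List.drop_eq_getElem_cons hi
      have htake : (cs.drop i).take (e - i) = cs[i] :: ((cs.drop (i + 1)).take (e - (i + 1))) := by
        rw [hdrop]
        have : e - i = (e - (i + 1)) + 1 := by omega
        rw [this, List.take_succ_cons]
      simp only [hi, dite_true, hne, if_false, htake, List.any_cons]
      by_cases hg : (PySem.Chars.isalnum cs[i] || cs[i] == '_') = true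
      · simp only [hg, if_true, Bool.not_true, Bool.false_or]
        exact ih (i + 1) (by omega) (by omega) (fun j hj hje hjl => hmin j (by omega) hje hjl)
      · simp [hg]

-- ===== VERDICT (by name: the statement is the Claim_ definition above) =====

theorem match_postgres_dollar_quote_delimiter_py_spec : Claim_equal_match_postgres_dollar_quote_delimiter_py := by
  intro text start _hdom hpre
  unfold Pre_match_postgres_dollar_quote_delimiter_py at hpre
  unfold Spec_match_postgres_dollar_quote_delimiter_py
  unfold match_postgres_dollar_quote_delimiter_py match_postgres_dollar_quote_delimiter_py_alt
  set cs := text.toList with hcs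
  rcases hpre with hpre | hne
  case inr =>
    -- text[start] is not '$' (or start is out of range): both guards fire, both sides are none
    rw [if_pos (Or.inr hne.2), if_pos (Or.inr (Or.inr hne.2))]
  obtain ⟨s, rfl⟩ : ∃ s : ℕ, start = (s : Int) := ⟨start.toNat, (Int.toNat_of_nonneg hpre).symm⟩
  have hnotneg : ¬ ((s : Int) < 0) := by omega
  by_cases hC : (s : Int) ≥ (cs.length : Int) ∨ PySem.List.pyGet? cs (s : Int) ≠ some '$'
  · have hC' : cs.length ≤ s ∨ ¬ cs[s]? = some '$' := by
      rcases hC with h | h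
      · left; exact_mod_cast h
      · right; simpa using h
    simp [hC']
  · simp only [hC, if_false]
    have haltF : ¬ ((s : Int) < 0 ∨ False) := by simp [hnotneg]
    rw [if_neg haltF]
    obtain ⟨hlen', hget'⟩ := not_or.mp hC
    have hlen : (s : Int) < (cs.length : Int) := by omega
    have hget : PySem.List.pyGet? cs (s : Int) = some '$' := not_not.mp hget'
    have hs : s < cs.length := by omega
    have hdollar : cs[s] = '$' := by
      rw [PySem.List.pyGet?_natCast, List.getElem?_eq_getElem hs] at hget
      exact Option.some_injective _ hget
    have hcast : (s : Int) + 1 = ((s + 1 : Nat) : Int) := by push_cast; ring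
    have hk1 : s + 1 ≤ cs.length := by omega
    simp only [Int.toNat_natCast]
    rw [hcast]
    by_cases hE : PySem.Chars.findFrom cs ['$'] ((s + 1 : Nat) : Int) none = -1
    · -- no closing dollar: both sides are none
      rw [if_pos hE]
      have hno : ¬ ['$'] <:+: cs.drop (s + 1) :=
        (PySem.Chars.findFrom_natCast_eq_neg_one_iff cs ['$'] (s + 1) hk1).mp hE
      have hnod : ∀ j, s + 1 ≤ j → (hj : j < cs.length) → cs[j] ≠ '$' := by
        intro j hj hjl habs
        apply hno
        rw [List.singleton_infix_iff]
        have hlt : j - (s + 1) < (cs.drop (s + 1)).length := by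
          rw [List.length_drop]; omega
        have hgd : (cs.drop (s + 1))[j - (s + 1)] = cs[j] := by
          rw [List.getElem_drop]; congr 1; omega
        rw [← habs, ← hgd]
        exact List.getElem_mem hlt
      exact (pvScanB_no_dollar cs s (cs.length - (s + 1)) (s + 1) le_rfl hnod).symm
    · rw [if_neg hE]
      obtain ⟨hle, hpre2, hmin2⟩ := PySem.Chars.findFrom_natCast_spec cs ['$'] (s + 1) hk1 hE
      set e := PySem.Chars.findFrom cs ['$'] ((s + 1 : Nat) : Int) none with heq
      have he0 : 0 ≤ e := le_trans (by positivity) hle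
      set en := e.toNat with hen
      have heint : e = (en : Int) := (Int.toNat_of_nonneg he0).symm
      have hnen : s + 1 ≤ en := by omega
      have hdropne : cs.drop en ≠ [] := by
        intro habs
        rw [habs] at hpre2
        exact List.cons_ne_nil _ _ (List.prefix_nil.mp hpre2)
      have henlt : en < cs.length := by
        by_contra h
        exact hdropne (List.drop_eq_nil_of_le (by omega))
      have hdollare : cs[en] = '$' := by
        have := List.drop_eq_getElem_cons henlt
        rw [this] at hpre2
        exact ((List.cons_prefix_cons.mp hpre2).1).symm
      have hmine : ∀ j, s + 1 ≤ j → j < en → (hj : j < cs.length) → cs[j] ≠ '$' := by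
        intro j hj hje hjl habs
        apply hmin2 j hj hje
        rw [List.drop_eq_getElem_cons hjl, habs]
        exact ⟨_, rfl⟩
      have hB := pvScanB_to_dollar cs s en henlt hdollare (en - (s + 1)) (s + 1) le_rfl hnen hmine
      have hslice : PySem.List.slice cs (some ((s + 1 : Nat) : Int)) (some ((en : Nat) : Int)) =
          (cs.drop (s + 1)).take (en - (s + 1)) := by
        rw [PySem.List.slice_natCast]
      rw [hB, heint, hslice]
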